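-- pv_equiv track=rewrite | github.com/zakhar-kogan/cayleyrl-iclr-2026 | cayleypy/puzzles/globe.py | globe_gens
-- ===== SOURCE A (Python) =====
-- from typing import Dict
--
-- def help_cyclic(start_pos: int, finish_pos: int, n: int) -> list[int]:
--     lst = []
--     for i in range(start_pos):
--         lst.append(i)
--     for i in range(start_pos, finish_pos + 1):
--         lst.append((i + 1) if i != finish_pos else start_pos)
--     for i in range(finish_pos + 1, n):
--         lst.append(i)
--     return lst
--
-- def globe_gens(a: int, b: int) -> Dict[str, list[int]]:
--     gens = {}
--     x_count = 2 * b
--     y_count = a + 1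
--     n = 2 * (a + 1) * b
--     for r_count in range(y_count):
--         gens[f"r{r_count}"] = help_cyclic(r_count * x_count, (r_count + 1) * x_count - 1, n)
--
--     total_a = y_count - 1
--     for f_count in range(x_count):
--         lst = list(range(n))
--
--         for i in range(y_count // 2):
--             block1 = []
--             block2 = []
--             for k in range(b):
--                 idx1 = i * x_count + (f_count + k) % x_count
--                 block1.append(idx1)
--                 idx2 = (total_a - i) * x_count + (f_count + k) % x_count
--                 block2.append(idx2)
--             for k in range(b):
--                 idx1 = block1[k]
--                 idx2 = block2[b - 1 - k]
--                 lst[idx1], lst[idx2] = lst[idx2], lst[idx1]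
--         gens[f"f{f_count}"] = lst
--
--     return gens
-- ===== SOURCE B (Python) =====
-- def _flip_target(p: int, f: int, x: int, b: int, total_a: int, y: int) -> int:
--     row, col = divmod(p, x)
--     j = (col - f) % x
--     if j < b and min(row, total_a - row) < y // 2:
--         return (total_a - row) * x + (f + b - 1 - j) % x
--     return p
--
-- def globe_gens(a: int, b: int) -> dict:
--     gens = {}
--     x = 2 * b
--     y = a + 1
--     n = 2 * (a + 1) * b
--     total_a = y - 1
--     for r in range(y):
--         s = r * x
--         gens[f"r{r}"] = [s + (p - s + 1) % x if s <= p < s + x else p for p in range(n)]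
--     for f in range(x):
--         gens[f"f{f}"] = [_flip_target(p, f, x, b, total_a, y) for p in range(n)]
--     return gens
-- ===== Notes on version B (the rewrite author's own statement) =====
-- stated objective: alternative
-- what changed: Each generator is built in a single comprehension over all n positions by (row,col) arithmetic - rotations map positions of row r to (col+1) mod x within the row, flips send a position whose window offset j=(col-f) mod x is < b and whose row is mirrored to (total_a-row)*x + (f+b-1-j) mod x - instead of help_cyclic's three append loops and the block-list construction plus pairwise in-place swaps.
import Mathlib
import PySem

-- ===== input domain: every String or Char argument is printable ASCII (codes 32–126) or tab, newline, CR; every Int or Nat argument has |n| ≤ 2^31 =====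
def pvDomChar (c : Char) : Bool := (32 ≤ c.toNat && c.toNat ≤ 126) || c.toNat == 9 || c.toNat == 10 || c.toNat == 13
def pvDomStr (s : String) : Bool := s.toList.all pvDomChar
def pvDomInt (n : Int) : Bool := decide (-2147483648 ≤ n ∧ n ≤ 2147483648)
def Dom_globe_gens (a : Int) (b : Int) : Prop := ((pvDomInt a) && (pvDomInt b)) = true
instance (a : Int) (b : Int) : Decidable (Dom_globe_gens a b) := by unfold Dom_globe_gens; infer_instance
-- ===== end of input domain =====

-- B builds each generator by a single (row,col)-arithmetic comprehension over all positions
-- instead of A's append loops and block-list swaps (objective: alternative decomposition).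


-- ===== PORT A =====
def help_cyclic (start_pos : Int) (finish_pos : Int) (n : Int) : List Int :=
  let lst : List Int := []
  let lst := (PySem.List.pyRange 0 start_pos 1).foldl (fun l i => l ++ [i]) lst
  let lst := (PySem.List.pyRange start_pos (finish_pos + 1) 1).foldl
      (fun l i => l ++ [if i ≠ finish_pos then i + 1 else start_pos]) lst
  let lst := (PySem.List.pyRange (finish_pos + 1) n 1).foldl (fun l i => l ++ [i]) lst
  lst

-- lst[idx1], lst[idx2] = lst[idx2], lst[idx1] and block accesses: ported with the total pyGetD/pySetD
-- forms; whenever these loops execute the indices are in range, exactly as in the Python (which never raises).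
def globe_gens (a : Int) (b : Int) : List (String × List Int) :=
  let gens : PySem.Dict String (List Int) := PySem.Dict.empty
  let x_count := 2 * b
  let y_count := a + 1
  let n := 2 * (a + 1) * b
  let gens := (PySem.List.pyRange 0 y_count 1).foldl (fun d r_count =>
      d.insert ("r" ++ PySem.Int.toStr r_count)
        (help_cyclic (r_count * x_count) ((r_count + 1) * x_count - 1) n)) gens
  let total_a := y_count - 1
  let gens := (PySem.List.pyRange 0 x_count 1).foldl (fun d f_count =>
      let lst := PySem.List.pyRange 0 n 1
      let lst := (PySem.List.pyRange 0 (PySem.Int.floordiv y_count 2) 1).foldl (fun lst i =>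
        let block1 := (PySem.List.pyRange 0 b 1).foldl
            (fun bl k => bl ++ [i * x_count + PySem.Int.mod (f_count + k) x_count]) []
        let block2 := (PySem.List.pyRange 0 b 1).foldl
            (fun bl k => bl ++ [(total_a - i) * x_count + PySem.Int.mod (f_count + k) x_count]) []
        (PySem.List.pyRange 0 b 1).foldl (fun lst k =>
          let idx1 := PySem.List.pyGetD block1 k 0
          let idx2 := PySem.List.pyGetD block2 (b - 1 - k) 0
          let v1 := PySem.List.pyGetD lst idx2 0
          let v2 := PySem.List.pyGetD lst idx1 0
          PySem.List.pySetD (PySem.List.pySetD lst idx1 v1) idx2 v2) lst) lst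
      d.insert ("f" ++ PySem.Int.toStr f_count) lst) gens
  gens.items

-- ===== PORT B =====
def flip_target (p : Int) (f : Int) (x : Int) (b : Int) (total_a : Int) (y : Int) : Int :=
  let row := PySem.Int.floordiv p x
  let col := PySem.Int.mod p x
  let j := PySem.Int.mod (col - f) x
  if j < b ∧ min row (total_a - row) < PySem.Int.floordiv y 2 then
    (total_a - row) * x + PySem.Int.mod (f + b - 1 - j) x
  else p

def globe_gens_alt (a : Int) (b : Int) : List (String × List Int) :=
  let gens : PySem.Dict String (List Int) := PySem.Dict.empty
  let x := 2 * b
  let y := a + 1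
  let n := 2 * (a + 1) * b
  let total_a := y - 1
  let gens := (PySem.List.pyRange 0 y 1).foldl (fun d r =>
      let s := r * x
      d.insert ("r" ++ PySem.Int.toStr r)
        ((PySem.List.pyRange 0 n 1).map (fun p =>
          if s ≤ p ∧ p < s + x then s + PySem.Int.mod (p - s + 1) x else p))) gens
  let gens := (PySem.List.pyRange 0 x 1).foldl (fun d f =>
      d.insert ("f" ++ PySem.Int.toStr f)
        ((PySem.List.pyRange 0 n 1).map (fun p => flip_target p f x b total_a y))) gens
  gens.items

-- ===== PRECONDITION & SPEC =====
def Spec_globe_gens (a : Int) (b : Int) (out : List (String × List Int)) : Prop := out = globe_gens_alt a b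
instance (a : Int) (b : Int) (out : List (String × List Int)) : Decidable (Spec_globe_gens a b out) := by unfold Spec_globe_gens; infer_instance

-- ===== CLAIM (what is proved, stated in full; the proofs are below) =====
def Claim_equal_globe_gens : Prop := ∀ (a : Int) (b : Int), Dom_globe_gens a b → Spec_globe_gens a b (globe_gens a b)

-- ===== LEMMAS AND PROOFS =====

theorem rgen_eq (a b r : Int) (hr0 : 0 ≤ r) (hr : r < a + 1) :
    help_cyclic (r * (2 * b)) ((r + 1) * (2 * b) - 1) (2 * (a + 1) * b) =
    (PySem.List.pyRange 0 (2 * (a + 1) * b) 1).map (fun p =>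
      if r * (2 * b) ≤ p ∧ p < r * (2 * b) + 2 * b then
        r * (2 * b) + PySem.Int.mod (p - r * (2 * b) + 1) (2 * b) else p) := by
  unfold help_cyclic
  dsimp only
  have hrb : (r + 1) * (2 * b) = r * (2 * b) + 2 * b := by ring
  have hab : 2 * (a + 1) * b = (a + 1) * (2 * b) := by ring
  have he : (r + 1) * (2 * b) - 1 + 1 = r * (2 * b) + 2 * b := by omega
  by_cases hb : b ≤ 0
  · -- b ≤ 0 : everything is empty
    have hs : r * (2 * b) ≤ 0 := mul_nonpos_of_nonneg_of_nonpos hr0 (by omega)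
    have hn : (a + 1) * (2 * b) ≤ (r + 1) * (2 * b) :=
      mul_le_mul_of_nonpos_right (by omega) (by omega)
    rw [PySem.List.pyRange_one_eq_nil hs,
        PySem.List.pyRange_one_eq_nil (show (r + 1) * (2 * b) - 1 + 1 ≤ r * (2 * b) by omega),
        PySem.List.pyRange_one_eq_nil (show 2 * (a + 1) * b ≤ (r + 1) * (2 * b) - 1 + 1 by omega),
        PySem.List.pyRange_one_eq_nil (show 2 * (a + 1) * b ≤ 0 by
          have : (a + 1) * (2 * b) ≤ 0 := mul_nonpos_of_nonneg_of_nonpos (by omega) (by omega)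
          omega)]
    simp
  · -- 1 ≤ b
    have hx : (0 : Int) < 2 * b := by omega
    have hs0 : 0 ≤ r * (2 * b) := mul_nonneg hr0 (by omega)
    have hsn : r * (2 * b) + 2 * b ≤ 2 * (a + 1) * b := by
      have : (r + 1) * (2 * b) ≤ (a + 1) * (2 * b) :=
        mul_le_mul_of_nonneg_right (by omega) (by omega)
      omega
    rw [PySem.List.foldl_append_singleton,
        PySem.List.foldl_append_singleton_eq_map
          (fun i => if i ≠ (r + 1) * (2 * b) - 1 then i + 1 else r * (2 * b)),
        PySem.List.foldl_append_singleton, he,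
        PySem.List.pyRange_one_append 0 (r * (2 * b)) (2 * (a + 1) * b) hs0 (by omega),
        PySem.List.pyRange_one_append (r * (2 * b)) (r * (2 * b) + 2 * b) (2 * (a + 1) * b)
          (by omega) hsn,
        List.map_append, List.map_append]
    have p1 : (PySem.List.pyRange 0 (r * (2 * b)) 1).map (fun p =>
        if r * (2 * b) ≤ p ∧ p < r * (2 * b) + 2 * b then
          r * (2 * b) + PySem.Int.mod (p - r * (2 * b) + 1) (2 * b) else p) =
        PySem.List.pyRange 0 (r * (2 * b)) 1 := by
      conv_rhs => rw [← List.map_id (PySem.List.pyRange 0 (r * (2 * b)) 1)]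
      apply List.map_congr_left
      intro p hp
      rw [PySem.List.mem_pyRange_one] at hp
      rw [if_neg (by omega)]
      rfl
    have p3 : (PySem.List.pyRange (r * (2 * b) + 2 * b) (2 * (a + 1) * b) 1).map (fun p =>
        if r * (2 * b) ≤ p ∧ p < r * (2 * b) + 2 * b then
          r * (2 * b) + PySem.Int.mod (p - r * (2 * b) + 1) (2 * b) else p) =
        PySem.List.pyRange (r * (2 * b) + 2 * b) (2 * (a + 1) * b) 1 := by
      conv_rhs => rw [← List.map_id (PySem.List.pyRange (r * (2 * b) + 2 * b) (2 * (a + 1) * b) 1)]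
      apply List.map_congr_left
      intro p hp
      rw [PySem.List.mem_pyRange_one] at hp
      rw [if_neg (by omega)]
      rfl
    have p2 : (PySem.List.pyRange (r * (2 * b)) (r * (2 * b) + 2 * b) 1).map (fun p =>
        if r * (2 * b) ≤ p ∧ p < r * (2 * b) + 2 * b then
          r * (2 * b) + PySem.Int.mod (p - r * (2 * b) + 1) (2 * b) else p) =
        (PySem.List.pyRange (r * (2 * b)) (r * (2 * b) + 2 * b) 1).map
          (fun i => if i ≠ (r + 1) * (2 * b) - 1 then i + 1 else r * (2 * b)) := by
      apply List.map_congr_left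
      intro p hp
      rw [PySem.List.mem_pyRange_one] at hp
      rw [if_pos ⟨hp.1, hp.2⟩, PySem.Int.mod_eq_emod_of_pos hx]
      by_cases hpe : p = (r + 1) * (2 * b) - 1
      · have h2 : p - r * (2 * b) + 1 = 2 * b := by omega
        rw [h2, Int.emod_self, if_neg (by omega)]
        omega
      · have h2 : (p - r * (2 * b) + 1) % (2 * b) = p - r * (2 * b) + 1 :=
          Int.emod_eq_of_lt (by omega) (by omega)
        rw [h2, if_pos (by omega)]
        omega
    rw [p1, p2, p3]
    simp [List.append_assoc]

-- target of the flip at p (row i ↔ row total_a-i, window column reflected)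
def pvTgt (a b f p : Int) : Int :=
  (a - PySem.Int.floordiv p (2 * b)) * (2 * b) +
    PySem.Int.mod (f + b - 1 - PySem.Int.mod (PySem.Int.mod p (2 * b) - f) (2 * b)) (2 * b)

-- state of A's f-loop list after the first t row-pairs have been swapped
def pvGmap (a b f t p : Int) : Int :=
  if PySem.Int.mod (PySem.Int.mod p (2 * b) - f) (2 * b) < b ∧
      min (PySem.Int.floordiv p (2 * b)) (a - PySem.Int.floordiv p (2 * b)) < t then
    pvTgt a b f p
  else p

-- state of A's inner swap loop after m of the b swaps of row pair (t, a - t)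
def pvGswap (a b f t m p : Int) : Int :=
  if (PySem.Int.floordiv p (2 * b) = t ∧
        PySem.Int.mod (PySem.Int.mod p (2 * b) - f) (2 * b) < m) ∨
     (PySem.Int.floordiv p (2 * b) = a - t ∧
        b - m ≤ PySem.Int.mod (PySem.Int.mod p (2 * b) - f) (2 * b) ∧
        PySem.Int.mod (PySem.Int.mod p (2 * b) - f) (2 * b) < b) then
    pvTgt a b f p
  else pvGmap a b f t p

theorem pv_fold_steps (STEP : List Int → Int → List Int) (G : Int → Int → Int)
    (R L0 : List Int) (M : Int) (hM : 0 ≤ M)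
    (hbase : R.map (G 0) = L0)
    (hstep : ∀ m : Int, 0 ≤ m → m < M → STEP (R.map (G m)) m = R.map (G (m + 1))) :
    List.foldl STEP L0 (PySem.List.pyRange 0 M 1) = R.map (G M) := by
  suffices h : ∀ m : Nat, (m : Int) ≤ M →
      List.foldl STEP L0 (PySem.List.pyRange 0 (m : Int) 1) = R.map (G (m : Int)) by
    have := h M.toNat (by omega)
    rwa [Int.toNat_of_nonneg hM] at this
  intro m
  induction m with
  | zero => intro _; rw [show ((0 : Nat) : Int) = 0 from rfl,
      PySem.List.pyRange_one_eq_nil (le_refl 0), List.foldl_nil, hbase]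
  | succ k ih =>
    intro hk
    have hcast : ((k + 1 : Nat) : Int) = (k : Int) + 1 := by push_cast; ring
    rw [hcast, PySem.List.pyRange_one_succ_right (by positivity), List.foldl_append,
        ih (by omega), List.foldl_cons, List.foldl_nil,
        hstep (k : Int) (by positivity) (by omega)]

theorem pv_set_map (n : Int) (g : Int → Int) (i v : Int) (h0 : 0 ≤ i) (hi : i < n) :
    ((PySem.List.pyRange 0 n 1).map g).set i.toNat v =
    (PySem.List.pyRange 0 n 1).map (fun p => if p = i then v else g p) := by
  apply List.ext_getElem
  · simp [PySem.List.length_pyRange_one]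
  · intro k h1 h2
    rw [List.getElem_set]
    by_cases hik : i.toNat = k
    · rw [if_pos hik, List.getElem_map, PySem.List.getElem_pyRange_one,
        if_pos (by omega)]
    · have hk : k < (n - 0).toNat := by
        simpa [PySem.List.length_pyRange_one] using h2
      rw [if_neg hik, List.getElem_map, List.getElem_map,
        PySem.List.getElem_pyRange_one, if_neg (by omega)]

theorem pv_mod_shift (x f m : Int) (hx : 0 < x) (h0 : 0 ≤ m) (hm : m < x) :
    PySem.Int.mod (PySem.Int.mod (f + m) x - f) x = m := by
  rw [PySem.Int.mod_eq_emod_of_pos hx, PySem.Int.mod_eq_emod_of_pos hx,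
    Int.sub_emod, Int.emod_emod_of_dvd _ dvd_rfl, ← Int.sub_emod,
    add_sub_cancel_left]
  exact Int.emod_eq_of_lt h0 hm

theorem pv_col_of_j (x f col : Int) (hx : 0 < x) (h0 : 0 ≤ col) (hc : col < x) :
    PySem.Int.mod (f + PySem.Int.mod (col - f) x) x = col := by
  have hc2 : f + (col - f) = col := by ring
  rw [PySem.Int.mod_eq_emod_of_pos hx, PySem.Int.mod_eq_emod_of_pos hx,
    Int.add_emod, Int.emod_emod_of_dvd _ dvd_rfl, ← Int.add_emod, hc2]
  exact Int.emod_eq_of_lt h0 hc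

theorem pv_decomp (x c e : Int) (hx : 0 < x) (h0 : 0 ≤ e) (he : e < x) :
    PySem.Int.floordiv (c * x + e) x = c ∧ PySem.Int.mod (c * x + e) x = e := by
  have h1 : PySem.Int.floordiv (c * x + e) x = c := by
    rw [PySem.Int.floordiv_eq_iff_of_pos hx]
    constructor <;> nlinarith
  have h2 := PySem.Int.floordiv_mul_add_mod (c * x + e) x
  rw [h1] at h2
  exact ⟨h1, by linarith⟩

-- the list state of A's inner loop is untouched at the two indices about to be swapped
theorem pv_eval_idx1 (a b f t m : Int) (hx : 0 < 2 * b) (ht0 : 0 ≤ t) (ht2 : 2 * t + 1 ≤ a)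
    (hm0 : 0 ≤ m) (hmb : m < b) :
    pvGswap a b f t m (t * (2 * b) + PySem.Int.mod (f + m) (2 * b)) =
      t * (2 * b) + PySem.Int.mod (f + m) (2 * b) := by
  obtain ⟨hd, hm'⟩ := pv_decomp (2 * b) t (PySem.Int.mod (f + m) (2 * b)) hx
    (PySem.Int.mod_nonneg _ hx) (PySem.Int.mod_lt _ hx)
  unfold pvGswap pvGmap
  rw [hd, hm', pv_mod_shift (2 * b) f m hx hm0 (by omega)]
  rw [if_neg (by omega), if_neg ?_]
  rintro ⟨-, hmin⟩
  rcases min_lt_iff.mp hmin with h | h <;> omega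

theorem pv_eval_idx2 (a b f t m : Int) (hx : 0 < 2 * b) (ht0 : 0 ≤ t) (ht2 : 2 * t + 1 ≤ a)
    (hm0 : 0 ≤ m) (hmb : m < b) :
    pvGswap a b f t m ((a - t) * (2 * b) + PySem.Int.mod (f + (b - 1 - m)) (2 * b)) =
      (a - t) * (2 * b) + PySem.Int.mod (f + (b - 1 - m)) (2 * b) := by
  obtain ⟨hd, hm'⟩ := pv_decomp (2 * b) (a - t) (PySem.Int.mod (f + (b - 1 - m)) (2 * b)) hx
    (PySem.Int.mod_nonneg _ hx) (PySem.Int.mod_lt _ hx)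
  unfold pvGswap pvGmap
  rw [hd, hm', pv_mod_shift (2 * b) f (b - 1 - m) hx (by omega) (by omega)]
  rw [if_neg (by omega), if_neg ?_]
  rintro ⟨-, hmin⟩
  rcases min_lt_iff.mp hmin with h | h <;> omega

-- after all b swaps of row pair (t, a-t), the state is the t+1 stage
theorem pv_gswap_done (a b f t p : Int) (hx : 0 < 2 * b) (ht0 : 0 ≤ t) (ht2 : 2 * t + 1 ≤ a)
    (hp0 : 0 ≤ p) (hpn : p < 2 * (a + 1) * b) :
    pvGswap a b f t b p = pvGmap a b f (t + 1) p := by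
  have hrow0 : 0 ≤ PySem.Int.floordiv p (2 * b) :=
    (PySem.Int.le_floordiv_iff_mul_le hx).mpr (by linarith)
  have hrowlt : PySem.Int.floordiv p (2 * b) < a + 1 :=
    (PySem.Int.floordiv_lt_iff_lt_mul hx).mpr (by linarith)
  have hj0 : 0 ≤ PySem.Int.mod (PySem.Int.mod p (2 * b) - f) (2 * b) :=
    PySem.Int.mod_nonneg _ hx
  have hjlt : PySem.Int.mod (PySem.Int.mod p (2 * b) - f) (2 * b) < 2 * b :=
    PySem.Int.mod_lt _ hx
  unfold pvGswap pvGmap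
  set row := PySem.Int.floordiv p (2 * b) with hrowdef
  set j := PySem.Int.mod (PySem.Int.mod p (2 * b) - f) (2 * b) with hjdef
  rcases min_cases row (a - row) with ⟨hmineq, hminle⟩ | ⟨hmineq, hminle⟩ <;>
    rw [hmineq] <;> split_ifs <;> first | rfl | omega

-- at m = 0 no position of the pair has been swapped yet
theorem pv_gswap_zero (a b f t p : Int) (hx : 0 < 2 * b) :
    pvGswap a b f t 0 p = pvGmap a b f t p := by
  have hj0 : 0 ≤ PySem.Int.mod (PySem.Int.mod p (2 * b) - f) (2 * b) :=
    PySem.Int.mod_nonneg _ hx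
  unfold pvGswap
  rw [if_neg (by omega)]

-- one simultaneous swap lst[idx1], lst[idx2] = lst[idx2], lst[idx1] advances the inner state
theorem pv_swap_step (a b f t m : Int) (hx : 0 < 2 * b) (ht0 : 0 ≤ t) (ht2 : 2 * t + 1 ≤ a)
    (hm0 : 0 ≤ m) (hmb : m < b) :
    PySem.List.pySetD
      (PySem.List.pySetD ((PySem.List.pyRange 0 (2 * (a + 1) * b) 1).map (pvGswap a b f t m))
        (t * (2 * b) + PySem.Int.mod (f + m) (2 * b))
        ((a - t) * (2 * b) + PySem.Int.mod (f + (b - 1 - m)) (2 * b)))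
      ((a - t) * (2 * b) + PySem.Int.mod (f + (b - 1 - m)) (2 * b))
      (t * (2 * b) + PySem.Int.mod (f + m) (2 * b)) =
    (PySem.List.pyRange 0 (2 * (a + 1) * b) 1).map (pvGswap a b f t (m + 1)) := by
  have hc1a : 0 ≤ PySem.Int.mod (f + m) (2 * b) := PySem.Int.mod_nonneg _ hx
  have hc1b : PySem.Int.mod (f + m) (2 * b) < 2 * b := PySem.Int.mod_lt _ hx
  have hc2a : 0 ≤ PySem.Int.mod (f + (b - 1 - m)) (2 * b) := PySem.Int.mod_nonneg _ hx
  have hc2b : PySem.Int.mod (f + (b - 1 - m)) (2 * b) < 2 * b := PySem.Int.mod_lt _ hx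
  have h1nn : 0 ≤ t * (2 * b) + PySem.Int.mod (f + m) (2 * b) := by
    have : 0 ≤ t * (2 * b) := mul_nonneg ht0 (by omega)
    omega
  have h1lt : t * (2 * b) + PySem.Int.mod (f + m) (2 * b) < 2 * (a + 1) * b := by nlinarith
  have h2nn : 0 ≤ (a - t) * (2 * b) + PySem.Int.mod (f + (b - 1 - m)) (2 * b) := by
    have : 0 ≤ (a - t) * (2 * b) := mul_nonneg (by omega) (by omega)
    omega
  have h2lt : (a - t) * (2 * b) + PySem.Int.mod (f + (b - 1 - m)) (2 * b) < 2 * (a + 1) * b := by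
    nlinarith
  obtain ⟨hd1, hm1⟩ := pv_decomp (2 * b) t (PySem.Int.mod (f + m) (2 * b)) hx hc1a hc1b
  obtain ⟨hd2, hm2⟩ := pv_decomp (2 * b) (a - t) (PySem.Int.mod (f + (b - 1 - m)) (2 * b)) hx hc2a hc2b
  have hj1 := pv_mod_shift (2 * b) f m hx hm0 (by omega)
  have hj2 := pv_mod_shift (2 * b) f (b - 1 - m) hx (by omega) (by omega)
  rw [PySem.List.pySetD_of_nonneg _ _ h1nn, pv_set_map _ _ _ _ h1nn h1lt,
      PySem.List.pySetD_of_nonneg _ _ h2nn, pv_set_map _ _ _ _ h2nn h2lt]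
  apply List.map_congr_left
  intro p hp
  rw [PySem.List.mem_pyRange_one] at hp
  by_cases hpe2 : p = (a - t) * (2 * b) + PySem.Int.mod (f + (b - 1 - m)) (2 * b)
  · rw [if_pos hpe2, hpe2]
    unfold pvGswap
    rw [hd2, hm2, hj2, if_pos (Or.inr ⟨rfl, by omega, by omega⟩)]
    unfold pvTgt
    rw [hd2, hm2, hj2, show a - (a - t) = t from by ring,
        show f + b - 1 - (b - 1 - m) = f + m from by ring]
  · rw [if_neg hpe2]
    by_cases hpe1 : p = t * (2 * b) + PySem.Int.mod (f + m) (2 * b)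
    · rw [if_pos hpe1, hpe1]
      unfold pvGswap
      rw [hd1, hm1, hj1, if_pos (Or.inl ⟨rfl, by omega⟩)]
      unfold pvTgt
      rw [hd1, hm1, hj1, show f + b - 1 - m = f + (b - 1 - m) from by ring]
    · rw [if_neg hpe1]
      have hrow0 : 0 ≤ PySem.Int.floordiv p (2 * b) :=
        (PySem.Int.le_floordiv_iff_mul_le hx).mpr (by linarith [hp.1])
      have hrowlt : PySem.Int.floordiv p (2 * b) < a + 1 :=
        (PySem.Int.floordiv_lt_iff_lt_mul hx).mpr (by linarith [hp.2])
      have hcol0 : 0 ≤ PySem.Int.mod p (2 * b) := PySem.Int.mod_nonneg _ hx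
      have hcollt : PySem.Int.mod p (2 * b) < 2 * b := PySem.Int.mod_lt _ hx
      have hj0 : 0 ≤ PySem.Int.mod (PySem.Int.mod p (2 * b) - f) (2 * b) :=
        PySem.Int.mod_nonneg _ hx
      have hjlt : PySem.Int.mod (PySem.Int.mod p (2 * b) - f) (2 * b) < 2 * b :=
        PySem.Int.mod_lt _ hx
      have hpdec := PySem.Int.floordiv_mul_add_mod p (2 * b)
      have hcolj := pv_col_of_j (2 * b) f (PySem.Int.mod p (2 * b)) hx hcol0 hcollt
      unfold pvGswap
      refine if_congr ?_ rfl rfl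
      constructor
      · rintro (⟨hrt, hjm⟩ | ⟨hra, hge, hlt⟩)
        · exact Or.inl ⟨hrt, by omega⟩
        · exact Or.inr ⟨hra, by omega, hlt⟩
      · rintro (⟨hrt, hjm⟩ | ⟨hra, hge, hlt⟩)
        · by_cases hjm' : PySem.Int.mod (PySem.Int.mod p (2 * b) - f) (2 * b) < m
          · exact Or.inl ⟨hrt, hjm'⟩
          · exfalso
            apply hpe1
            have hje : PySem.Int.mod (PySem.Int.mod p (2 * b) - f) (2 * b) = m := by omega
            rw [hje] at hcolj
            rw [hrt] at hpdec
            linarith [hcolj, hpdec]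
        · by_cases hge' : b - m ≤ PySem.Int.mod (PySem.Int.mod p (2 * b) - f) (2 * b)
          · exact Or.inr ⟨hra, hge', hlt⟩
          · exfalso
            apply hpe2
            have hje : PySem.Int.mod (PySem.Int.mod p (2 * b) - f) (2 * b) = b - 1 - m := by omega
            rw [hje] at hcolj
            rw [hra] at hpdec
            linarith [hcolj, hpdec]

theorem fgen_eq (a b f : Int) (hf0 : 0 ≤ f) (hf : f < 2 * b) :
    ((PySem.List.pyRange 0 (PySem.Int.floordiv (a + 1) 2) 1).foldl (fun lst i =>
        let block1 := (PySem.List.pyRange 0 b 1).foldl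
            (fun bl k => bl ++ [i * (2 * b) + PySem.Int.mod (f + k) (2 * b)]) []
        let block2 := (PySem.List.pyRange 0 b 1).foldl
            (fun bl k => bl ++ [((a + 1 - 1) - i) * (2 * b) + PySem.Int.mod (f + k) (2 * b)]) []
        (PySem.List.pyRange 0 b 1).foldl (fun lst k =>
          let idx1 := PySem.List.pyGetD block1 k 0
          let idx2 := PySem.List.pyGetD block2 (b - 1 - k) 0
          let v1 := PySem.List.pyGetD lst idx2 0
          let v2 := PySem.List.pyGetD lst idx1 0
          PySem.List.pySetD (PySem.List.pySetD lst idx1 v1) idx2 v2) lst)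
        (PySem.List.pyRange 0 (2 * (a + 1) * b) 1)) =
    (PySem.List.pyRange 0 (2 * (a + 1) * b) 1).map
      (fun p => flip_target p f (2 * b) b (a + 1 - 1) (a + 1)) := by
  have hb : 0 < b := by omega
  have hx : (0 : Int) < 2 * b := by omega
  dsimp only
  simp only [add_sub_cancel_right, PySem.List.foldl_append_singleton_eq_map, List.nil_append]
  by_cases ha : a + 1 ≤ 0
  · have hh : PySem.Int.floordiv (a + 1) 2 ≤ 0 := by
      rw [PySem.Int.floordiv_eq_ediv_of_pos (by omega : (0:Int) < 2)]
      omega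
    have hn : 2 * (a + 1) * b ≤ 0 := by nlinarith
    rw [PySem.List.pyRange_one_eq_nil hh, PySem.List.pyRange_one_eq_nil hn]
    simp
  · have ha0 : 0 ≤ a := by omega
    have hH0 : 0 ≤ PySem.Int.floordiv (a + 1) 2 := by
      rw [PySem.Int.floordiv_eq_ediv_of_pos (by omega : (0:Int) < 2)]
      omega
    have hfun : (fun p => flip_target p f (2 * b) b a (a + 1)) =
        pvGmap a b f (PySem.Int.floordiv (a + 1) 2) := rfl
    rw [hfun]
    refine pv_fold_steps _ (pvGmap a b f) _ _ _ hH0 ?_ ?_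
    · conv_rhs => rw [← List.map_id (PySem.List.pyRange 0 (2 * (a + 1) * b) 1)]
      apply List.map_congr_left
      intro p hp
      rw [PySem.List.mem_pyRange_one] at hp
      have hrow0 : 0 ≤ PySem.Int.floordiv p (2 * b) :=
        (PySem.Int.le_floordiv_iff_mul_le hx).mpr (by linarith [hp.1])
      have hrowlt : PySem.Int.floordiv p (2 * b) < a + 1 :=
        (PySem.Int.floordiv_lt_iff_lt_mul hx).mpr (by linarith [hp.2])
      unfold pvGmap
      rw [if_neg]
      · rfl
      · rintro ⟨-, hmin⟩
        rcases min_lt_iff.mp hmin with h | h <;> omega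
    · intro t ht0 htH
      have ht2 : 2 * t + 1 ≤ a := by
        rw [PySem.Int.floordiv_eq_ediv_of_pos (by omega : (0:Int) < 2)] at htH
        omega
      have hdone : (PySem.List.pyRange 0 (2 * (a + 1) * b) 1).map (pvGswap a b f t b) =
          (PySem.List.pyRange 0 (2 * (a + 1) * b) 1).map (pvGmap a b f (t + 1)) := by
        apply List.map_congr_left
        intro p hp
        rw [PySem.List.mem_pyRange_one] at hp
        exact pv_gswap_done a b f t p hx ht0 ht2 hp.1 hp.2
      rw [← hdone]
      refine pv_fold_steps _ (pvGswap a b f t) _ _ b (by omega) ?_ ?_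
      · apply List.map_congr_left
        intro p _
        exact pv_gswap_zero a b f t p hx
      · intro m hm0 hmb
        have h1nn : 0 ≤ t * (2 * b) + PySem.Int.mod (f + m) (2 * b) := by
          have h := PySem.Int.mod_nonneg (f + m) hx
          have : 0 ≤ t * (2 * b) := mul_nonneg ht0 (by omega)
          omega
        have h1lt : t * (2 * b) + PySem.Int.mod (f + m) (2 * b) < 2 * (a + 1) * b := by
          have h := PySem.Int.mod_lt (f + m) hx
          nlinarith
        have h2nn : 0 ≤ (a - t) * (2 * b) + PySem.Int.mod (f + (b - 1 - m)) (2 * b) := by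
          have h := PySem.Int.mod_nonneg (f + (b - 1 - m)) hx
          have : 0 ≤ (a - t) * (2 * b) := mul_nonneg (by omega) (by omega)
          omega
        have h2lt : (a - t) * (2 * b) + PySem.Int.mod (f + (b - 1 - m)) (2 * b) < 2 * (a + 1) * b := by
          have h := PySem.Int.mod_lt (f + (b - 1 - m)) hx
          nlinarith
        rw [PySem.List.pyGetD_map_pyRange_of_nonneg _ b m 0 hm0 hmb,
            PySem.List.pyGetD_map_pyRange_of_nonneg _ b (b - 1 - m) 0 (by omega) (by omega),
            PySem.List.pyGetD_map_pyRange_of_nonneg (pvGswap a b f t m) (2 * (a + 1) * b)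
              ((a - t) * (2 * b) + PySem.Int.mod (f + (b - 1 - m)) (2 * b)) 0 h2nn h2lt,
            PySem.List.pyGetD_map_pyRange_of_nonneg (pvGswap a b f t m) (2 * (a + 1) * b)
              (t * (2 * b) + PySem.Int.mod (f + m) (2 * b)) 0 h1nn h1lt,
            pv_eval_idx1 a b f t m hx ht0 ht2 hm0 hmb,
            pv_eval_idx2 a b f t m hx ht0 ht2 hm0 hmb]
        exact pv_swap_step a b f t m hx ht0 ht2 hm0 hmb

-- ===== VERDICT (by name: the statement is the Claim_ definition above) =====
theorem globe_gens_spec : Claim_equal_globe_gens := by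
  intro a b _
  show globe_gens a b = globe_gens_alt a b
  unfold globe_gens globe_gens_alt
  dsimp only
  refine congrArg PySem.Dict.items ?_
  have hR : (List.foldl (fun (d : PySem.Dict String (List Int)) r =>
        d.insert ("r" ++ PySem.Int.toStr r)
          (help_cyclic (r * (2 * b)) ((r + 1) * (2 * b) - 1) (2 * (a + 1) * b)))
        PySem.Dict.empty (PySem.List.pyRange 0 (a + 1) 1)) =
      (List.foldl (fun (d : PySem.Dict String (List Int)) r =>
        d.insert ("r" ++ PySem.Int.toStr r)
          ((PySem.List.pyRange 0 (2 * (a + 1) * b) 1).map (fun p =>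
            if r * (2 * b) ≤ p ∧ p < r * (2 * b) + 2 * b then
              r * (2 * b) + PySem.Int.mod (p - r * (2 * b) + 1) (2 * b) else p)))
        PySem.Dict.empty (PySem.List.pyRange 0 (a + 1) 1)) := by
    apply PySem.List.foldl_congr_mem
    intro acc r hm
    rw [PySem.List.mem_pyRange_one] at hm
    rw [rgen_eq a b r hm.1 hm.2]
  rw [hR]
  apply PySem.List.foldl_congr_mem
  intro acc f hm
  rw [PySem.List.mem_pyRange_one] at hm
  rw [fgen_eq a b f hm.1 hm.2]
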